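-- pv_equiv track=rewrite | github.com/himanshu8948/agentic-honeypot | scripts/eval_150_exchanges.py | _worst_repeat_example
-- ===== SOURCE A (Python) =====
-- def _worst_repeat_example(items: list[str]) -> tuple[int, str]:
--     best = 1
--     best_item = items[0] if items else ""
--     run = 1
--     for i in range(1, len(items)):
--         if items[i] == items[i - 1]:
--             run += 1
--             if run > best:
--                 best = run
--                 best_item = items[i]
--         else:
--             run = 1
--     return best, best_item
-- ===== SOURCE B (Python) =====
-- def _worst_repeat_example(items: list[str]) -> tuple[int, str]:
--     if not items:
--         return (1, "")
--     # build the run-length encoding: list of (key, run_length) for consecutive runs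
--     groups = []
--     cur, n = items[0], 1
--     for x in items[1:]:
--         if x == cur:
--             n += 1
--         else:
--             groups.append((cur, n))
--             cur, n = x, 1
--     groups.append((cur, n))
--     best_key, best_len = max(groups, key=lambda g: g[1])
--     return (best_len, best_key)
-- ===== Notes on version B (the rewrite author's own statement) =====
-- stated objective: alternative
-- what changed: B first builds the run-length encoding of the list (consecutive (key, run_length) groups) and then selects the first maximal run with max(), instead of A's single inline best/run counter over indices.
import Mathlib
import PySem

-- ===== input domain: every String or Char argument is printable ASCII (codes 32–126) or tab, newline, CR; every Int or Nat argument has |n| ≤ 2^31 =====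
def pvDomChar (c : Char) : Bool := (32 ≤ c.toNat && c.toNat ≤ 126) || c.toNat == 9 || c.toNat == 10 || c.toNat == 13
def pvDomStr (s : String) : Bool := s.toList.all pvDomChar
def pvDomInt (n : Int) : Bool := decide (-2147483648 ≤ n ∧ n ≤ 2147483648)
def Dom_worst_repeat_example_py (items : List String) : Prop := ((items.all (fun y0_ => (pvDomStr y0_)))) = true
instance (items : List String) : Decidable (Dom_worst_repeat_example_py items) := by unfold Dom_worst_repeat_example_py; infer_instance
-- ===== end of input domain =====

-- B builds the run-length encoding first and then max-scans it; same O(n) cost, different decomposition.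

-- ===== PORT A =====
-- loop body of A's for-loop (state = (best, best_item, run), i the loop index)
def pvBody (items : List String) (s : Int × String × Int) (i : Int) : Int × String × Int :=
  if PySem.List.pyGetD items i "" == PySem.List.pyGetD items (i - 1) "" then
    let run := s.2.2 + 1
    if run > s.1 then (run, PySem.List.pyGetD items i "", run) else (s.1, s.2.1, run)
  else (s.1, s.2.1, 1)

def worst_repeat_example_py (items : List String) : Int × String :=
  let best : Int := 1
  let best_item : String := if items.isEmpty then "" else PySem.List.pyGetD items 0 ""
  let run : Int := 1
  let r := (PySem.List.pyRange 1 (items.length : Int) 1).foldl (pvBody items) (best, best_item, run)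
  (r.1, r.2.1)

-- ===== PORT B =====
-- the groups-building loop of Source B (acc = groups so far, cur/n = current run)
def pvGroupsGo (acc : List (String × Int)) (cur : String) (n : Int) : List String → List (String × Int)
  | [] => acc ++ [(cur, n)]
  | y :: ys => if y == cur then pvGroupsGo acc cur (n + 1) ys else pvGroupsGo (acc ++ [(cur, n)]) y 1 ys

-- Python's max(groups, key=...): first element with strictly greatest key
def pvPickMax (b : String × Int) : List (String × Int) → String × Int
  | [] => b
  | g :: gs => if g.2 > b.2 then pvPickMax g gs else pvPickMax b gs

def worst_repeat_example_py_alt (items : List String) : Int × String :=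
  match items with
  | [] => (1, "")
  | x :: xs =>
    match pvGroupsGo [] x 1 xs with
    | [] => (1, "")  -- unreachable: the groups list is always nonempty
    | g :: gs =>
      let m := pvPickMax g gs
      (m.2, m.1)

-- ===== PRECONDITION & SPEC =====
def Spec_worst_repeat_example_py (items : List String) (out : Int × String) : Prop := out = worst_repeat_example_py_alt items
instance (items : List String) (out : Int × String) : Decidable (Spec_worst_repeat_example_py items out) := by unfold Spec_worst_repeat_example_py; infer_instance

-- ===== CLAIM (what is proved, stated in full; the proofs are below) =====
def Claim_equal_worst_repeat_example_py : Prop := ∀ (items : List String), Dom_worst_repeat_example_py items → Spec_worst_repeat_example_py items (worst_repeat_example_py items)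

-- ===== LEMMAS AND PROOFS =====

-- cons-style (non-accumulator) version of the groups builder, for the proofs
def pvGo (cur : String) (n : Int) : List String → List (String × Int)
  | [] => [(cur, n)]
  | y :: ys => if y == cur then pvGo cur (n + 1) ys else (cur, n) :: pvGo y 1 ys

lemma pvGroupsGo_eq (ys : List String) : ∀ (acc : List (String × Int)) (cur : String) (n : Int),
    pvGroupsGo acc cur n ys = acc ++ pvGo cur n ys := by
  induction ys with
  | nil => intro acc cur n; simp [pvGroupsGo, pvGo]
  | cons y ys ih =>
    intro acc cur n
    by_cases h : y == cur <;> simp [pvGroupsGo, pvGo, h, ih]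

lemma pvGo_shape (ys : List String) : ∀ (prev : String) (r : Int),
    ∃ m rest, pvGo prev r ys = (prev, m) :: rest ∧ r ≤ m := by
  induction ys with
  | nil => intro prev r; exact ⟨r, [], rfl, le_refl r⟩
  | cons y ys ih =>
    intro prev r
    by_cases h : y == prev
    · obtain ⟨m, rest, he, hle⟩ := ih prev (r + 1)
      exact ⟨m, rest, by simp [pvGo, h, he], by omega⟩
    · exact ⟨r, pvGo y 1 ys, by simp [pvGo, h], le_refl r⟩

-- recursive form of A's loop over the remaining elements, carrying the previous element
def pvStep (prev y : String) (s : Int × String × Int) : Int × String × Int :=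
  if y == prev then
    let run := s.2.2 + 1
    if run > s.1 then (run, y, run) else (s.1, s.2.1, run)
  else (s.1, s.2.1, 1)

def pvAux (prev : String) (s : Int × String × Int) : List String → Int × String × Int
  | [] => s
  | y :: ys => pvAux y (pvStep prev y s) ys

lemma pvGetD_mid (pre rest : List String) (prev : String) :
    PySem.List.pyGetD (pre ++ prev :: rest) ((pre.length : Int)) "" = prev := by
  rw [PySem.List.pyGetD_natCast]
  simp [List.getD]

-- A's indexed fold equals the recursive pvAux on the tail
lemma pvFoldl_eq_aux (items : List String) : ∀ (rest pre : List String) (prev : String)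
    (s : Int × String × Int), items = pre ++ prev :: rest →
    (PySem.List.pyRange ((pre.length : Int) + 1) (items.length : Int) 1).foldl (pvBody items) s
      = pvAux prev s rest := by
  intro rest
  induction rest with
  | nil =>
    intro pre prev s h
    subst h
    rw [PySem.List.pyRange_one_eq_nil (by simp)]
    rfl
  | cons y rest ih =>
    intro pre prev s h
    have hlen : (items.length : Int) = (pre.length : Int) + 2 + rest.length := by
      subst h; simp; omega
    rw [PySem.List.pyRange_one_cons (by omega)]
    have hcur : PySem.List.pyGetD items ((pre.length : Int) + 1) "" = y := by
      have : ((pre.length : Int) + 1) = (((pre ++ [prev]).length : Nat) : Int) := by simp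
      rw [this, h]
      have := pvGetD_mid (pre ++ [prev]) rest y
      simpa using this
    have hprev : PySem.List.pyGetD items ((pre.length : Int) + 1 - 1) "" = prev := by
      have : ((pre.length : Int) + 1 - 1) = ((pre.length : Nat) : Int) := by omega
      rw [this, h]
      exact pvGetD_mid pre (y :: rest) prev
    have hbody : pvBody items s ((pre.length : Int) + 1) = pvStep prev y s := by
      simp only [pvBody, pvStep, hcur, hprev]
    have happ : items = (pre ++ [prev]) ++ y :: rest := by simp [h]
    have := ih (pre ++ [prev]) y (pvStep prev y s) happ
    have hc : (((pre ++ [prev]).length : Nat) : Int) + 1 = (pre.length : Int) + 1 + 1 := by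
      simp
    rw [hc] at this
    simp only [List.foldl_cons, hbody, pvAux]
    exact this

-- once the current run is strictly longer than the stored best, the stored best no longer matters
lemma pvPickMax_absorb (ys : List String) : ∀ (prev : String) (r b : Int) (bi : String), b < r →
    pvPickMax (bi, b) (pvGo prev r ys) = pvPickMax (prev, r) (pvGo prev r ys) := by
  induction ys with
  | nil =>
    intro prev r b bi hb
    simp only [pvGo, pvPickMax]
    rw [if_pos (by simpa using hb), if_neg (by simp)]
  | cons y ys ih =>
    intro prev r b bi hb
    by_cases h : y == prev
    · simp only [pvGo, h, if_pos]
      rw [ih prev (r + 1) b bi (by omega), ih prev (r + 1) r prev (by omega)]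
    · simp only [pvGo, h, if_neg, Bool.false_eq_true, not_false_iff, pvPickMax]
      rw [if_pos (by simpa using hb), if_neg (by simp)]

-- main invariant: A's recursive loop equals B's max-scan over the remaining groups
lemma pvAux_eq_pickMax (ys : List String) : ∀ (prev : String) (run best : Int) (bi : String),
    1 ≤ run → run ≤ best →
    (((pvAux prev (best, bi, run) ys).1, (pvAux prev (best, bi, run) ys).2.1) : Int × String)
      = ((pvPickMax (bi, best) (pvGo prev run ys)).2, (pvPickMax (bi, best) (pvGo prev run ys)).1) := by
  induction ys with
  | nil =>
    intro prev run best bi h1 h2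
    simp only [pvAux, pvGo, pvPickMax]
    rw [if_neg (by simp; omega)]
  | cons y ys ih =>
    intro prev run best bi h1 h2
    by_cases h : y == prev
    · by_cases hgt : run + 1 > best
      · simp only [pvAux, pvStep, h, if_pos, hgt, pvGo]
        rw [ih y (run + 1) (run + 1) y (by omega) (by omega)]
        have hy : y = prev := by simpa using h
        subst hy
        rw [pvPickMax_absorb ys y (run + 1) best bi (by omega)]
      · simp only [pvAux, pvStep, h, if_pos, hgt, pvGo, if_false]
        rw [ih y (run + 1) best bi (by omega) (by omega)]
        have hy : y = prev := by simpa using h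
        subst hy
        rfl
    · simp only [pvAux, pvStep, h, if_neg, Bool.false_eq_true, not_false_iff, pvGo, pvPickMax]
      rw [ih y 1 best bi (by omega) (by omega)]
      rw [if_neg (by simp; omega)]

-- ===== VERDICT (by name: the statement is the Claim_ definition above) =====
theorem worst_repeat_example_py_spec : Claim_equal_worst_repeat_example_py := by
  intro items _
  unfold Spec_worst_repeat_example_py
  cases items with
  | nil => rfl
  | cons x xs =>
    obtain ⟨m, rest, hgo, hm⟩ := pvGo_shape xs x 1
    have hbi : PySem.List.pyGetD (x :: xs) 0 "" = x := by
      simp [PySem.List.pyGetD_zero_cons]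
    have hfold := pvFoldl_eq_aux (x :: xs) xs [] x (1, x, 1) (by simp)
    simp only [List.length_nil, Nat.cast_zero, zero_add] at hfold
    have hmain := pvAux_eq_pickMax xs x 1 1 x (le_refl 1) (le_refl 1)
    simp only [worst_repeat_example_py, worst_repeat_example_py_alt, List.isEmpty_cons,
      Bool.false_eq_true, if_false, hbi]
    rw [hfold, hmain, pvGroupsGo_eq, hgo]
    simp only [List.nil_append]
    by_cases h1 : m > 1
    · simp only [pvPickMax, if_pos (by simpa using h1)]
    · have hm1 : m = 1 := by omega
      subst hm1
      simp only [pvPickMax]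
      split <;> rfl
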